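-- pv_equiv track=rewrite | github.com/alexandraback/datacollection | solutions_5738606668808192_1/Python/nonomen/coin.py | toB
-- ===== SOURCE A (Python) =====
-- def toB(i,b):
--     r = 0
--     m = 1
--     while i > 0 :
--         r += m*(1&i)
--         i = i>>1
--         m *= b
--     return r
-- ===== SOURCE B (Python) =====
-- def toB(i, b):
--     bits = []
--     while i > 0:
--         bits.append(1 & i)
--         i = i >> 1
--     r = 0
--     for d in reversed(bits):
--         r = r * b + d
--     return r
-- ===== Notes on version B (the rewrite author's own statement) =====
-- stated objective: alternative
-- what changed: B first collects the bits of i into a list and then evaluates it MSB-first with Horner's rule (r = r*b + bit), instead of A's single LSB-first pass that maintains an explicit power-of-b accumulator m.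
import Mathlib
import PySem

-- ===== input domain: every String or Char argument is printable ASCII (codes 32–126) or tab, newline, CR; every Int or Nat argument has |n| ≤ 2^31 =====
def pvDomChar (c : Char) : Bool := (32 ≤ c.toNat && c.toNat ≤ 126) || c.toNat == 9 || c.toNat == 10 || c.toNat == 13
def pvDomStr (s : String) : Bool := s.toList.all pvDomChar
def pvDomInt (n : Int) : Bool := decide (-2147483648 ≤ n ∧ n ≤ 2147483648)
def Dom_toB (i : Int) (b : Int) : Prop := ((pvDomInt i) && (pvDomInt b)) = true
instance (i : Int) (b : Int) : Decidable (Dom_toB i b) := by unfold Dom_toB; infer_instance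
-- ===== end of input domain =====

-- B collects the bits of i into a list, then evaluates it MSB-first with Horner's rule,
-- instead of A's single LSB-first pass with an explicit power-of-b accumulator.


-- termination helper for both while-loops: i>>1 shrinks toNat when i > 0
theorem pvShiftHalf_lt (i : Int) (h : 0 < i) : (i >>> (1:Int)).toNat < i.toNat := by
  obtain ⟨n, rfl⟩ : ∃ n : ℕ, i = (n : Int) := ⟨i.toNat, (Int.toNat_of_nonneg h.le).symm⟩
  have h1 : (n : Int) >>> ((1 : ℕ) : Int) = ((n >>> 1 : ℕ) : Int) := Int.shiftRight_natCast n 1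
  have h2 : ((1 : ℕ) : Int) = (1 : Int) := by norm_cast
  rw [h2] at h1
  rw [h1, Int.toNat_natCast, Int.toNat_natCast, Nat.shiftRight_eq_div_pow]
  have hn : 0 < n := by exact_mod_cast h
  omega

-- ===== PORT A =====
-- the while loop of A, state (i, r, m)
def toBLoop (i b r m : Int) : Int :=
  if i > 0 then toBLoop (i >>> 1) b (r + m * (Int.land 1 i)) (m * b) else r
termination_by i.toNat
decreasing_by exact pvShiftHalf_lt i (by omega)

def toB (i : Int) (b : Int) : Int := toBLoop i b 0 1

-- ===== PORT B =====
-- first loop of B: collect bits of i, LSB first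
def collectBits (i : Int) : List Int :=
  if i > 0 then (Int.land 1 i) :: collectBits (i >>> 1) else []
termination_by i.toNat
decreasing_by exact pvShiftHalf_lt i (by omega)

def toB_alt (i : Int) (b : Int) : Int :=
  ((collectBits i).reverse).foldl (fun r d => r * b + d) 0

-- ===== PRECONDITION & SPEC =====
def Spec_toB (i : Int) (b : Int) (out : Int) : Prop := out = toB_alt i b
instance (i : Int) (b : Int) (out : Int) : Decidable (Spec_toB i b out) := by unfold Spec_toB; infer_instance

-- ===== CLAIM (what is proved, stated in full; the proofs are below) =====
def Claim_equal_toB : Prop := ∀ (i : Int) (b : Int), Dom_toB i b → Spec_toB i b (toB i b)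

-- ===== LEMMAS AND PROOFS =====

-- LSB-first value of a digit list in base b
def valLSB (b : Int) : List Int → Int
  | [] => 0
  | d :: t => d + b * valLSB b t

theorem toBLoop_eq_aux (b : Int) : ∀ (n : ℕ) (i r m : Int), i.toNat ≤ n →
    toBLoop i b r m = r + m * valLSB b (collectBits i) := by
  intro n
  induction n with
  | zero =>
    intro i r m h
    have hp : ¬ i > 0 := by omega
    rw [toBLoop, collectBits, if_neg hp, if_neg hp, valLSB]
    ring
  | succ n ih =>
    intro i r m h
    by_cases hp : i > 0
    · have hlt := pvShiftHalf_lt i hp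
      rw [toBLoop, collectBits, if_pos hp, if_pos hp, ih _ _ _ (by omega), valLSB]
      ring
    · rw [toBLoop, collectBits, if_neg hp, if_neg hp, valLSB]
      ring

theorem toBLoop_eq (b i r m : Int) : toBLoop i b r m = r + m * valLSB b (collectBits i) :=
  toBLoop_eq_aux b i.toNat i r m le_rfl

theorem horner_reverse (b : Int) : ∀ (l : List Int) (r : Int),
    (l.reverse).foldl (fun r d => r * b + d) r = r * b ^ l.length + valLSB b l := by
  intro l
  induction l with
  | nil => intro r; simp [valLSB]
  | cons d t ih =>
    intro r
    simp only [List.reverse_cons, List.foldl_append, List.foldl_cons, List.foldl_nil, ih,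
      valLSB, List.length_cons]
    ring

-- ===== VERDICT (by name: the statement is the Claim_ definition above) =====
theorem toB_spec : Claim_equal_toB := by
  intro i b _
  show toB i b = toB_alt i b
  rw [toB, toB_alt, toBLoop_eq, horner_reverse]
  ring
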